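-- pv_equiv track=rewrite | github.com/0xStryK3R/Scaler-DSA-Revision | python/Day-42/CW_3.py | solve
-- ===== SOURCE A (Python) =====
-- def solve(A):
--     m = 10**9 + 7
--     A.sort()
--     ans = 0
--     N = len(A)
--     for i in range(N):
--         ans = (ans + (A[i] << i) % m - (A[i] << (N - i - 1)) % m) % m
--
--     return ans
-- ===== SOURCE B (Python) =====
-- def solve(A):
--     m = 10**9 + 7
--     A.sort()
--     f = 0
--     for x in reversed(A):
--         f = (f * 2 + x) % m
--     b = 0
--     for x in A:
--         b = (b * 2 + x) % m
--     return (f - b) % m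
-- ===== Notes on version B (the rewrite author's own statement) =====
-- stated objective: faster
-- what changed: Replaces the per-index big-integer shift terms (A[i]<<i and A[i]<<(N-1-i) recomputed at every i) by two Horner-style accumulator passes f=(f*2+x)%m over the reversed and the forward sorted list, returning (f-b)%m, so all arithmetic stays below the modulus.
import Mathlib
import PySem

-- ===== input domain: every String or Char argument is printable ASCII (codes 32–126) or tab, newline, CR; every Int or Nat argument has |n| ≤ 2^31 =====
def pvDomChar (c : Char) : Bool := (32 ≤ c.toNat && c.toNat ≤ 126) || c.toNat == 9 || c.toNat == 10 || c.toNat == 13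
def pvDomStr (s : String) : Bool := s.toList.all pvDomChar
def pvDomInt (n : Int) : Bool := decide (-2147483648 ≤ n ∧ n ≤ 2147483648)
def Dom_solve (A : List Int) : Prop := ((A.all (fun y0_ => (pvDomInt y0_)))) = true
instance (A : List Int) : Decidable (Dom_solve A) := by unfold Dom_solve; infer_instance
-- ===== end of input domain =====

-- B replaces the per-index shifts (A[i]<<i, A[i]<<(N-1-i)) by two Horner-rule accumulator
-- passes over the sorted list (reversed and forward); like A it sorts its argument in place.

-- ===== PORT A =====
def solve (A : List Int) : Int :=
  let m : Int := 10 ^ 9 + 7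
  let As := PySem.List.sorted A (fun x => x) false
  let N : Int := PySem.List.len As
  (PySem.List.pyRange 0 N 1).foldl
    (fun ans i =>
      PySem.Int.mod (ans + PySem.Int.mod (PySem.List.pyGetD As i 0 <<< i.toNat) m
        - PySem.Int.mod (PySem.List.pyGetD As i 0 <<< (N - i - 1).toNat) m) m) 0

-- ===== PORT B =====
def solve_alt (A : List Int) : Int :=
  let m : Int := 10 ^ 9 + 7
  let As := PySem.List.sorted A (fun x => x) false
  let f := As.reverse.foldl (fun f x => PySem.Int.mod (f * 2 + x) m) 0
  let b := As.foldl (fun b x => PySem.Int.mod (b * 2 + x) m) 0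
  PySem.Int.mod (f - b) m

-- ===== PRECONDITION & SPEC =====
def Spec_solve (A : List Int) (out : Int) : Prop := out = solve_alt A
instance (A : List Int) (out : Int) : Decidable (Spec_solve A out) := by unfold Spec_solve; infer_instance

-- ===== CLAIM (what is proved, stated in full; the proofs are below) =====
def Claim_equal_solve : Prop := ∀ (A : List Int), Dom_solve A → Spec_solve A (solve A)

-- ===== LEMMAS AND PROOFS =====

-- the modulus of both programs
def pvM : Int := 10 ^ 9 + 7

theorem pvM_eq : (10 : Int) ^ 9 + 7 = pvM := rfl

theorem pvM_num : pvM = 1000000007 := by norm_num [pvM]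

theorem pvMod_eq (x : Int) : PySem.Int.mod x pvM = x % pvM :=
  PySem.Int.mod_eq_emod_of_pos (by norm_num [pvM])

-- exact (un-modded) Horner evaluation
def hornerH (a : Int) (l : List Int) : Int := l.foldl (fun f x => f * 2 + x) a

theorem hornerH_cons (a x : Int) (l : List Int) : hornerH a (x :: l) = hornerH (a * 2 + x) l := rfl

theorem hornerH_shift (l : List Int) : ∀ a : Int, hornerH a l = a * 2 ^ l.length + hornerH 0 l := by
  induction l with
  | nil => intro a; simp [hornerH]
  | cons x t ih =>
      intro a
      rw [hornerH_cons, ih, hornerH_cons 0, ih (0 * 2 + x)]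
      simp only [List.length_cons, pow_succ]
      ring

theorem hornerH_append_singleton (a x : Int) (l : List Int) :
    hornerH a (l ++ [x]) = 2 * hornerH a l + x := by
  simp [hornerH, List.foldl_append]; ring

-- pure emod congruences used at each loop step
theorem pvStep_emod (a u v : Int) :
    (a % pvM + u % pvM - v % pvM) % pvM = (a + u - v) % pvM := by
  rw [pvM_num]; omega

theorem pvHorner_emod (a x : Int) : ((a % pvM) * 2 + x) % pvM = (a * 2 + x) % pvM := by
  rw [pvM_num]; omega

theorem pvSub_emod (u v : Int) : (u % pvM - v % pvM) % pvM = (u - v) % pvM := by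
  rw [pvM_num]; omega

-- B's modded Horner loop computes the emod of the exact Horner value
theorem modHorner (l : List Int) : ∀ a : Int,
    l.foldl (fun f x => PySem.Int.mod (f * 2 + x) (10 ^ 9 + 7)) (a % pvM) = hornerH a l % pvM := by
  induction l with
  | nil => intro a; simp [hornerH]
  | cons x t ih =>
      intro a
      have hih := ih (a * 2 + x)
      simp only [List.foldl_cons, pvM_eq, pvMod_eq] at hih ⊢
      rw [pvHorner_emod, hih, hornerH_cons]

-- A's loop over enumerate: invariant with running index s and exact Horner sums
theorem pvAloop (L : List Int) : ∀ (l : List Int) (s a : Int), 0 ≤ s → s + l.length = L.length →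
    (PySem.List.enumerate l s).foldl
      (fun (ans : Int) (p : Int × Int) =>
        PySem.Int.mod (ans + PySem.Int.mod (p.2 <<< p.1.toNat) (10 ^ 9 + 7)
          - PySem.Int.mod (p.2 <<< ((L.length : Int) - p.1 - 1).toNat) (10 ^ 9 + 7)) (10 ^ 9 + 7))
      (a % pvM)
    = (a + 2 ^ s.toNat * hornerH 0 l.reverse - hornerH 0 l) % pvM := by
  intro l
  induction l with
  | nil => intro s a _ _; simp [hornerH, PySem.List.enumerate]
  | cons x t ih =>
      intro s a hs hlen
      have hlt : ((L.length : Int) - s - 1).toNat = t.length := by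
        simp only [List.length_cons] at hlen; omega
      have hih := ih (s + 1) (a + x * 2 ^ s.toNat - x * 2 ^ t.length) (by omega)
        (by simp only [List.length_cons] at hlen ⊢; push_cast at hlen ⊢; omega)
      rw [PySem.List.enumerate_cons, List.foldl_cons]
      simp only [pvM_eq, pvMod_eq, Int.shiftLeft_eq] at hih ⊢
      simp only [hlt]
      rw [pvStep_emod a (x * 2 ^ s.toNat) (x * 2 ^ t.length), hih]
      have hrev : hornerH 0 (x :: t).reverse = 2 * hornerH 0 t.reverse + x := by
        rw [List.reverse_cons, hornerH_append_singleton]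
      have hfwd : hornerH 0 (x :: t) = x * 2 ^ t.length + hornerH 0 t := by
        rw [hornerH_cons, hornerH_shift]; ring
      have hpow : (2 : Int) ^ (s + 1).toNat = 2 ^ s.toNat * 2 := by
        have h1 : (s + 1).toNat = s.toNat + 1 := by omega
        rw [h1, pow_succ]
      rw [hrev, hfwd, hpow]
      ring_nf

-- both programs equal (hornerH 0 L.reverse − hornerH 0 L) % pvM, L = sorted(A)
theorem solve_eq_alt (A : List Int) : solve A = solve_alt A := by
  unfold solve solve_alt
  set L := PySem.List.sorted A (fun x => x) false with hL
  simp only [PySem.List.len_eq]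
  have hA :
      (PySem.List.pyRange 0 (L.length : Int) 1).foldl
        (fun ans i =>
          PySem.Int.mod (ans + PySem.Int.mod (PySem.List.pyGetD L i 0 <<< i.toNat) (10 ^ 9 + 7)
            - PySem.Int.mod
                (PySem.List.pyGetD L i 0 <<< ((L.length : Int) - i - 1).toNat) (10 ^ 9 + 7))
            (10 ^ 9 + 7)) 0
      = (hornerH 0 L.reverse - hornerH 0 L) % pvM := by
    have hmap := PySem.List.enumerate_eq_map_pyRange L (0 : Int)
    simp only [PySem.List.len_eq] at hmap
    have hloop := pvAloop L L 0 0 le_rfl (by simp)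
    rw [hmap, List.foldl_map] at hloop
    simpa using hloop
  rw [hA]
  have hf := modHorner L.reverse 0
  have hb := modHorner L 0
  rw [show ((0 : Int) % pvM) = 0 from rfl] at hf hb
  rw [hf, hb, pvM_eq, pvMod_eq, pvSub_emod]

-- ===== VERDICT (by name: the statement is the Claim_ definition above) =====
theorem solve_spec : Claim_equal_solve := by
  intro A _
  unfold Spec_solve
  exact solve_eq_alt A
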